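-- pv_equiv track=rewrite | github.com/bidhanar/WordScape_Solution | main.py | all_words
-- ===== SOURCE A (Python) =====
-- import itertools
--
-- def all_words(words):
--     all = []
--     for i in range(len(words)):
--         perm = list(itertools.permutations(words[i]))
--         for i in range(len(perm)):
--             st = ""
--             for j in range(len(perm[i])):
--                 st += perm[i][j]
--             all.append(st)
--     return all
-- ===== SOURCE B (Python) =====
-- def all_words(words):
--     # Iterative breadth-first expansion: a level holds (prefix, remaining) pairs;
--     # each round every prefix is extended by each remaining character by index,
--     # so after len(w) rounds the prefixes are the permutations in itertools order.
--     out = []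
--     for w in words:
--         level = [("", w)]
--         for _ in range(len(w)):
--             level = [(p + r[i], r[:i] + r[i + 1:]) for (p, r) in level for i in range(len(r))]
--         for p, _r in level:
--             out.append(p)
--     return out
-- ===== Notes on version B (the rewrite author's own statement) =====
-- stated objective: alternative
-- what changed: Replaces itertools.permutations plus a per-tuple character-join loop with an iterative breadth-first expansion of (prefix, remaining) pairs that builds the joined permutation strings level by level, with no tuple list and no join pass.
import Mathlib
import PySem

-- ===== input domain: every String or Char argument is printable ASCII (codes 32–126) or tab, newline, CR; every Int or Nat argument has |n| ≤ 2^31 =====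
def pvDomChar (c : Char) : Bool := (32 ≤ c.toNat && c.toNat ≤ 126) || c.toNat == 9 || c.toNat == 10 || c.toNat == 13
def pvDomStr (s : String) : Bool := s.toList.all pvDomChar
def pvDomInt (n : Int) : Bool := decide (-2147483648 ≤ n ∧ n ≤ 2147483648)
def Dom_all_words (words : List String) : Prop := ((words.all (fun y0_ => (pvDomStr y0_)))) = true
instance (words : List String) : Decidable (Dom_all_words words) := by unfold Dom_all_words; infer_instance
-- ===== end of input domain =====

-- B replaces itertools.permutations + a per-tuple join loop by an iterative breadth-first
-- expansion of (prefix, remaining) pairs emitting the joined strings directly (alternative decomposition).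

-- ===== PORT A =====
-- model of list(itertools.permutations(l)): pick each index in order, recurse on the rest.
-- fuel = l.length at every call (eraseIdx of an in-range index shortens the list by one).
def pvItPerms : Nat → List Char → List (List Char)
  | 0, _ => [[]]
  | n + 1, l =>
      (List.range l.length).flatMap
        (fun i => (pvItPerms n (l.eraseIdx i)).map (fun p => l.getD i ' ' :: p))

def all_words (words : List String) : List String :=
  (List.range words.length).foldl
    (fun all i =>
      (List.range (pvItPerms (words.getD i "").toList.length (words.getD i "").toList).length).foldl
        (fun all i2 =>
          all ++ [(List.range ((pvItPerms (words.getD i "").toList.length (words.getD i "").toList).getD i2 []).length).foldl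
            (fun st j => st.push (((pvItPerms (words.getD i "").toList.length (words.getD i "").toList).getD i2 []).getD j ' ')) ""])
        all)
    []

-- ===== PORT B =====
-- one level-expansion round: the Python string `r` is modeled as its character list, so
-- r[i] is r.getD i ' ' (index always in range) and r[:i] + r[i+1:] is r.eraseIdx i — exact.
def pvStep (L : List (String × List Char)) : List (String × List Char) :=
  L.flatMap (fun pr =>
    (List.range pr.2.length).map (fun i => (pr.1.push (pr.2.getD i ' '), pr.2.eraseIdx i)))

def all_words_alt (words : List String) : List String :=
  words.foldl
    (fun out w =>
      ((List.range w.toList.length).foldl (fun level _ => pvStep level)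
          [("", w.toList)]).foldl
        (fun out pr => out ++ [pr.1]) out)
    []

-- ===== PRECONDITION & SPEC =====
def Spec_all_words (words : List String) (out : List String) : Prop := out = all_words_alt words
instance (words : List String) (out : List String) : Decidable (Spec_all_words words out) := by unfold Spec_all_words; infer_instance

-- ===== CLAIM (what is proved, stated in full; the proofs are below) =====
def Claim_equal_all_words : Prop := ∀ (words : List String), Dom_all_words words → Spec_all_words words (all_words words)

-- ===== LEMMAS AND PROOFS =====

-- the per-word joined permutation list, shared target of both ports
def pvWordPerms (w : String) : List String :=
  (pvItPerms w.toList.length w.toList).map (fun p => String.ofList p)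

theorem pv_push_ofList (s : String) (c : Char) (p : List Char) :
    s.push c ++ String.ofList p = s ++ String.ofList (c :: p) := by
  apply String.toList_inj.mp
  simp

-- A's innermost loop (st += perm[i][j]) builds the joined string
theorem pv_str (p : List Char) (s : String) :
    (List.range p.length).foldl (fun st j => st.push (p.getD j ' ')) s = s ++ String.ofList p := by
  induction p generalizing s with
  | nil => simp
  | cons c cs ih =>
      rw [List.length_cons, List.range_succ_eq_map, List.foldl_cons, List.foldl_map]
      simp only [List.getD_cons_succ, List.getD_cons_zero]
      rw [ih (s.push c), pv_push_ofList]

-- A's middle loop appends the join of each tuple of perm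
theorem pv_inner (perm : List (List Char)) (all : List String) :
    (List.range perm.length).foldl
        (fun all i2 =>
          all ++ [(List.range (perm.getD i2 []).length).foldl
            (fun st j => st.push ((perm.getD i2 []).getD j ' ')) ""])
        all
      = all ++ perm.map (fun p => String.ofList p) := by
  induction perm generalizing all with
  | nil => simp
  | cons q qs ih =>
      rw [List.length_cons, List.range_succ_eq_map, List.foldl_cons, List.foldl_map]
      simp only [List.getD_cons_succ, List.getD_cons_zero]
      rw [pv_str q "", ih]
      simp

-- A's outer loop, with the accumulator generalized
theorem pv_outer (words : List String) (acc : List String) :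
    (List.range words.length).foldl
        (fun all i =>
          (List.range (pvItPerms (words.getD i "").toList.length (words.getD i "").toList).length).foldl
            (fun all i2 =>
              all ++ [(List.range ((pvItPerms (words.getD i "").toList.length (words.getD i "").toList).getD i2 []).length).foldl
                (fun st j => st.push (((pvItPerms (words.getD i "").toList.length (words.getD i "").toList).getD i2 []).getD j ' ')) ""])
            all)
        acc
      = words.foldl (fun all w => all ++ pvWordPerms w) acc := by
  induction words generalizing acc with
  | nil => simp
  | cons w ws ih =>
      rw [List.length_cons, List.range_succ_eq_map, List.foldl_cons, List.foldl_map]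
      simp only [List.getD_cons_succ, List.getD_cons_zero]
      rw [pv_inner, ih, List.foldl_cons]
      rfl

-- B's level iteration: after n rounds the prefixes of a level whose remainders all
-- have length n are exactly the prefixes extended by the itertools permutations
theorem pv_level (n : Nat) (L : List (String × List Char))
    (h : ∀ pr ∈ L, (pr.2 : List Char).length = n) :
    ((List.range n).foldl (fun level _ => pvStep level) L).map Prod.fst
      = L.flatMap (fun pr => (pvItPerms n pr.2).map (fun q => pr.1 ++ String.ofList q)) := by
  induction n generalizing L with
  | zero =>
      simp only [List.range_zero, List.foldl_nil, pvItPerms]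
      induction L with
      | nil => simp
      | cons a t iht =>
          simp only [List.map_cons, List.flatMap_cons, List.map_nil]
          rw [iht (by intro pr hpr; exact h pr (List.mem_cons_of_mem a hpr))]
          simp
  | succ n ih =>
      rw [List.range_succ_eq_map, List.foldl_cons, List.foldl_map]
      have hstepmem : ∀ pr ∈ pvStep L, (pr.2 : List Char).length = n := by
        intro pr hpr
        rcases List.mem_flatMap.mp hpr with ⟨qr, hqr, hmem⟩
        rcases List.mem_map.mp hmem with ⟨i, hi, rfl⟩
        have hlt : i < (qr.2 : List Char).length := List.mem_range.mp hi
        have := h qr hqr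
        simp only [List.length_eraseIdx_of_lt hlt, this]
        omega
      rw [ih (pvStep L) hstepmem]
      rw [pvStep, List.flatMap_assoc]
      have hfun : (fun pr : String × List Char =>
            ((List.range pr.2.length).map
              (fun i => (pr.1.push (pr.2.getD i ' '), pr.2.eraseIdx i))).flatMap
              (fun pr' => (pvItPerms n pr'.2).map (fun q => pr'.1 ++ String.ofList q)))
          = (fun pr : String × List Char =>
            (pvItPerms (n + 1) pr.2).map (fun q => pr.1 ++ String.ofList q)) := by
        funext pr
        rw [List.flatMap_map, pvItPerms, List.map_flatMap]
        apply List.flatMap_congr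
        intro i _
        simp [Function.comp_def, List.map_map, pv_push_ofList]
      rw [hfun]

-- B's outer fold, with the accumulator generalized
theorem pv_alt_outer (words : List String) (acc : List String) :
    words.foldl
        (fun out w =>
          ((List.range w.toList.length).foldl (fun level _ => pvStep level)
              [("", w.toList)]).foldl
            (fun out pr => out ++ [pr.1]) out)
        acc
      = words.foldl (fun all w => all ++ pvWordPerms w) acc := by
  induction words generalizing acc with
  | nil => rfl
  | cons w ws ih =>
      rw [List.foldl_cons, List.foldl_cons, ih]
      congr 1
      rw [PySem.List.foldl_append_singleton_eq_map]
      congr 1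
      have h0 : ∀ pr ∈ ([("", w.toList)] : List (String × List Char)),
          (pr.2 : List Char).length = w.toList.length := by
        intro pr hpr
        simp at hpr
        subst hpr
        rfl
      rw [pv_level w.toList.length [("", w.toList)] h0]
      simp [pvWordPerms]

-- ===== VERDICT (by name: the statement is the Claim_ definition above) =====
theorem all_words_spec : Claim_equal_all_words := by
  intro words _
  unfold Spec_all_words all_words_alt
  rw [all_words, pv_outer, pv_alt_outer]
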